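-- pv_equiv track=rewrite | github.com/federicotorrielli/stableKnowledge | json_analyzer/json_analyzer.py | list_shared_items
-- ===== SOURCE A (Python) =====
-- def list_shared_items(coders: list) -> list:
--     # Create a dictionary to store the answers for each item
--     item_answers = {}
--
--     # Iterate through the tuples and add the answers to the dictionary
--     for coder, item, answer in coders:
--         if item not in item_answers:
--             item_answers[item] = []
--         item_answers[item].append(answer)
--
--     # Create a list to store the shared items
--     shared_items = []
--
--     # Iterate through the dictionary and check if all the answers are True
--     for item, answers in item_answers.items():
--         if all(answers):
--             shared_items.append(item)
--
--     return shared_items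
-- ===== SOURCE B (Python) =====
-- def list_shared_items(coders: list) -> list:
--     # One pass: remember first-seen order and a set of disqualified items,
--     # then keep the seen items that were never disqualified.
--     disqualified = set()
--     seen = []
--     seen_set = set()
--     for coder, item, answer in coders:
--         if item not in seen_set:
--             seen_set.add(item)
--             seen.append(item)
--         if not answer:
--             disqualified.add(item)
--     return [item for item in seen if item not in disqualified]
-- ===== Notes on version B (the rewrite author's own statement) =====
-- stated objective: alternative
-- what changed: Replaces the per-item answer-list dict plus a second all()-reducing pass with a single pass that maintains a first-seen ordered list and a 'disqualified' membership set, then filters the seen items by set membership.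
import Mathlib
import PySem

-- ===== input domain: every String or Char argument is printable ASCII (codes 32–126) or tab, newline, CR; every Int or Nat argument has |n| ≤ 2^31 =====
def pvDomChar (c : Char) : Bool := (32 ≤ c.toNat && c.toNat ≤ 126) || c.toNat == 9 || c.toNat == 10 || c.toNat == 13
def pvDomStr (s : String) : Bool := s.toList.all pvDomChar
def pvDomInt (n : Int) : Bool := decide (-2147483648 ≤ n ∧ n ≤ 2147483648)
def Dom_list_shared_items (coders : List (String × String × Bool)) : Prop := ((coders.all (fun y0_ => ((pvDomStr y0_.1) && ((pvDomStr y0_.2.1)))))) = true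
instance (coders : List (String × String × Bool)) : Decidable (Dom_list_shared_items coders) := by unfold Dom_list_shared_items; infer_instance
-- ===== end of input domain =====

-- B replaces A's answer-list dict + second all() pass with one pass keeping a
-- first-seen ordered list and a disqualified set, filtered by membership (alternative decomposition).

-- ===== PORT A =====
-- step of A's first loop: 'if item not in d: d[item] = []' then 'd[item].append(answer)'
def pvStepA (d : PySem.Dict String (List Bool)) (c : String × String × Bool) :
    PySem.Dict String (List Bool) :=
  let d1 := if d.contains c.2.1 then d else d.insert c.2.1 []
  d1.modify c.2.1 [] (fun a => a ++ [c.2.2])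

def list_shared_items (coders : List (String × String × Bool)) : List String :=
  let item_answers := coders.foldl pvStepA PySem.Dict.empty
  item_answers.items.foldl
    (fun shared p => if p.2.all id then shared ++ [p.1] else shared) []

-- ===== PORT B =====
-- step of B's single loop over the state (seen, disqualified)
def pvStepB (st : PySem.Set String × PySem.Set String) (c : String × String × Bool) :
    PySem.Set String × PySem.Set String :=
  (PySem.Set.add st.1 c.2.1, if !c.2.2 then PySem.Set.add st.2 c.2.1 else st.2)

def list_shared_items_alt (coders : List (String × String × Bool)) : List String :=
  let st := coders.foldl pvStepB (PySem.Set.empty, PySem.Set.empty)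
  st.1.filter (fun item => !(PySem.Set.contains st.2 item))

-- ===== PRECONDITION & SPEC =====
def Spec_list_shared_items (coders : List (String × String × Bool)) (out : List String) : Prop := out = list_shared_items_alt coders
instance (coders : List (String × String × Bool)) (out : List String) : Decidable (Spec_list_shared_items coders out) := by unfold Spec_list_shared_items; infer_instance

-- ===== CLAIM (what is proved, stated in full; the proofs are below) =====
def Claim_equal_list_shared_items : Prop := ∀ (coders : List (String × String × Bool)), Dom_list_shared_items coders → Spec_list_shared_items coders (list_shared_items coders)

-- ===== LEMMAS AND PROOFS =====

-- the dict step keeps keys in first-seen order: they evolve exactly like B's seen set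
theorem pv_keys_stepA (d : PySem.Dict String (List Bool)) (c : String × String × Bool) :
    (pvStepA d c).keys = PySem.Set.add d.keys c.2.1 := by
  unfold pvStepA
  by_cases hc : d.contains c.2.1 = true
  · have hmem : c.2.1 ∈ d.keys := (PySem.Dict.contains_iff_mem_keys d c.2.1).mp hc
    simp only [hc, if_true, PySem.Dict.keys_modify]
    rw [PySem.Dict.keys_insert_of_contains _ _ hc, PySem.Set.add_of_mem hmem]
  · have hc' : d.contains c.2.1 = false := by simpa using hc
    have hmem : c.2.1 ∉ d.keys := fun h => by
      simp [(PySem.Dict.contains_iff_mem_keys d c.2.1).mpr h] at hc'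
    simp only [hc', Bool.false_eq_true, if_false, PySem.Dict.keys_modify]
    rw [PySem.Dict.keys_insert_of_contains _ _
        (PySem.Dict.contains_insert_self d c.2.1 []),
      PySem.Dict.keys_insert_of_not_contains d _ hc',
      PySem.Set.add_of_not_mem hmem]

-- the dict step appends the answer to the item's list and leaves other keys alone
theorem pv_getD_stepA (d : PySem.Dict String (List Bool)) (c : String × String × Bool)
    (k : String) :
    (pvStepA d c).getD k [] =
      if k = c.2.1 then d.getD c.2.1 [] ++ [c.2.2] else d.getD k [] := by
  unfold pvStepA
  by_cases hc : d.contains c.2.1 = true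
  · simp only [hc, if_true, PySem.Dict.getD_modify]
  · have hc' : d.contains c.2.1 = false := by simpa using hc
    simp only [hc', Bool.false_eq_true, if_false, PySem.Dict.getD_modify,
      PySem.Dict.getD_insert]
    by_cases hk : k = c.2.1
    · simp [hk, PySem.Dict.getD_of_not_contains d _ hc']
    · simp [hk]

-- coupled loop invariant: A's dict keys are B's seen list, and "all answers true"
-- means exactly "not disqualified"
theorem pv_loop_inv (l : List (String × String × Bool))
    (d : PySem.Dict String (List Bool)) (s q : PySem.Set String)
    (hk : d.keys = s)
    (hv : ∀ k, ((d.getD k []).all id = true) ↔ k ∉ q) :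
    (l.foldl pvStepA d).keys = (l.foldl pvStepB (s, q)).1 ∧
      ∀ k, (((l.foldl pvStepA d).getD k []).all id = true)
        ↔ k ∉ (l.foldl pvStepB (s, q)).2 := by
  induction l generalizing d s q with
  | nil => exact ⟨hk, hv⟩
  | cons c t ih =>
    simp only [List.foldl_cons]
    have hstep : pvStepB (s, q) c
        = (PySem.Set.add s c.2.1, if !c.2.2 then PySem.Set.add q c.2.1 else q) := rfl
    rw [hstep]
    refine ih (pvStepA d c) _ _ ?_ ?_
    · rw [pv_keys_stepA, hk]
    · intro k
      rw [pv_getD_stepA]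
      by_cases hkc : k = c.2.1
      · subst hkc
        simp only [if_true]
        cases hans : c.2.2 with
        | true =>
          simp only [Bool.not_true, Bool.false_eq_true, if_false]
          simpa [List.all_append] using hv c.2.1
        | false =>
          simp only [Bool.not_false, if_true]
          simp [List.all_append, PySem.Set.mem_add]
      · simp only [hkc, if_false]
        cases hans : c.2.2 with
        | true =>
          simp only [Bool.not_true, Bool.false_eq_true, if_false]
          exact hv k
        | false =>
          simp only [Bool.not_false, if_true]
          rw [hv k]
          simp [PySem.Set.mem_add, hkc]

-- B's seen list stays duplicate-free
theorem pv_nodupB (l : List (String × String × Bool)) (s q : PySem.Set String)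
    (hs : s.Nodup) : ((l.foldl pvStepB (s, q)).1).Nodup := by
  induction l generalizing s q with
  | nil => exact hs
  | cons c t ih => exact ih _ _ (PySem.Set.nodup_add _ _ hs)

-- ===== VERDICT (by name: the statement is the Claim_ definition above) =====
theorem list_shared_items_spec : Claim_equal_list_shared_items := by
  intro coders _
  unfold Spec_list_shared_items
  show (coders.foldl pvStepA PySem.Dict.empty).items.foldl
      (fun shared p => if p.2.all id then shared ++ [p.1] else shared) []
    = (coders.foldl pvStepB (PySem.Set.empty, PySem.Set.empty)).1.filter
        (fun item =>
          !(PySem.Set.contains (coders.foldl pvStepB (PySem.Set.empty, PySem.Set.empty)).2 item))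
  have inv := pv_loop_inv coders PySem.Dict.empty PySem.Set.empty PySem.Set.empty
    (by simp [PySem.Dict.keys_empty, PySem.Set.empty])
    (by intro k; simp [PySem.Dict.getD_empty, PySem.Set.empty])
  set d := coders.foldl pvStepA PySem.Dict.empty with hd
  set st := coders.foldl pvStepB (PySem.Set.empty, PySem.Set.empty) with hst
  have hnodup : st.1.Nodup := pv_nodupB coders _ _ List.nodup_nil
  have hkeys : d.keys = st.1 := inv.1
  simp only [PySem.List.foldl_append_if]
  rw [PySem.Dict.items_eq_map_keys d (hkeys ▸ hnodup) [],
    List.filter_map, List.map_map, List.nil_append]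
  simp only [Function.comp_def]
  rw [hkeys, List.map_id']
  refine List.filter_congr (fun k _ => ?_)
  have h := inv.2 k
  cases hC : PySem.Set.contains st.2 k with
  | true =>
    have hm : k ∈ st.2 := by simpa using hC
    simp only [Bool.not_true]
    cases hA : (d.getD k []).all id with
    | false => rfl
    | true => exact absurd hm (h.mp hA)
  | false =>
    have hm : k ∉ st.2 := by simpa using hC
    simp only [Bool.not_false]
    exact h.mpr hm
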